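-- pv_equiv track=rewrite | github.com/dhh1128/langkit | langtool/lang.py | _generate_syllables
-- ===== SOURCE A (Python) =====
-- def _generate_syllables(pattern, vowels, consonants):
--     i = pattern.find('V')
--     if i > -1:
--         for V in vowels:
--             for result in _generate_syllables(pattern[:i] + V + pattern[i + 1:], vowels, consonants):
--                 yield result
--     else:
--         i = pattern.find('C')
--         if i > -1:
--             for C in consonants:
--                 for result in _generate_syllables(pattern[:i] + C + pattern[i + 1:], vowels, consonants):
--                     yield result
--         else:
--             yield pattern
-- ===== SOURCE B (Python) =====
-- def _generate_syllables(pattern, vowels, consonants):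
--     nV = pattern.count('V')
--     nC = pattern.count('C')
--     vtups = [[]]
--     for _ in range(nV):
--         vtups = [t + [v] for t in vtups for v in vowels]
--     ctups = [[]]
--     for _ in range(nC):
--         ctups = [t + [c] for t in ctups for c in consonants]
--     for vt in vtups:
--         for ct in ctups:
--             out = []
--             vi = 0
--             ci = 0
--             for ch in pattern:
--                 if ch == 'V':
--                     out.append(vt[vi])
--                     vi += 1
--                 elif ch == 'C':
--                     out.append(ct[ci])
--                     ci += 1
--                 else:
--                     out.append(ch)
--             yield ''.join(out)
-- ===== Notes on version B (the rewrite author's own statement) =====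
-- stated objective: alternative
-- what changed: A recursively rebuilds and re-scans the pattern string for each substitution; B computes the placeholder counts once, materialises the vowel- and consonant-assignment tuples by an iterative product, and fills a frozen copy of the pattern per assignment in one pass.
-- outside the precondition, e.g. on _generate_syllables('C', ['a'], ['Va']): A returns ['aa'], B returns ['Va']; on _generate_syllables('V', ['xC'], ['p']): A returns ['xp'], B returns ['xC']
import Mathlib
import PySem

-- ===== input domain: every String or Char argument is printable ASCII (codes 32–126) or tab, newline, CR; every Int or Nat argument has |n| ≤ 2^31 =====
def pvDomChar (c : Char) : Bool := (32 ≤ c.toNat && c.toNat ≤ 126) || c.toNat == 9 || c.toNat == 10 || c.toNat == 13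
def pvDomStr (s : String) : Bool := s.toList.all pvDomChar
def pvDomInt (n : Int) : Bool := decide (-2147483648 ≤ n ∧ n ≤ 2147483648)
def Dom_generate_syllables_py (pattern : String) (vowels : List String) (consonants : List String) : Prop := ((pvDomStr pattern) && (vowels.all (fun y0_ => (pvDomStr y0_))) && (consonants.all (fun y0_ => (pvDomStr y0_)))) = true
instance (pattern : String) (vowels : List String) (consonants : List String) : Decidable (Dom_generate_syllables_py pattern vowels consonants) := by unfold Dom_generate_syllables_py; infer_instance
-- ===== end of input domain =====

-- B replaces A's rebuild-and-rescan recursion by counting the placeholders once, building the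
-- assignment tuples with an iterative product, and filling the fixed pattern in one pass
-- (objective: alternative algorithm; the equivalence is about return values — both Pythons are generators).

-- ===== PORT A =====
-- A's recursion has no structural decreasing measure (the pattern string is rebuilt each call), so
-- the port uses fuel; under Pre_ every call removes one placeholder, so the fuel bound below is
-- never exhausted (the 0-fuel branch is unreachable on Pre_ inputs).
def pvGenA (vowels consonants : List (List Char)) : Nat → List Char → List (List Char)
  | 0, _ => []
  | Nat.succ fuel, pat =>
    let i := PySem.Chars.find pat ['V']
    if i > -1 then
      vowels.foldl (fun acc v =>
        acc ++ pvGenA vowels consonants fuel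
          (PySem.List.slice pat none (some i) ++ v ++ PySem.List.slice pat (some (i + 1)) none)) []
    else
      let j := PySem.Chars.find pat ['C']
      if j > -1 then
        consonants.foldl (fun acc c =>
          acc ++ pvGenA vowels consonants fuel
            (PySem.List.slice pat none (some j) ++ c ++ PySem.List.slice pat (some (j + 1)) none)) []
      else [pat]

def pvTokSum (vowels consonants : List String) : Nat :=
  ((vowels ++ consonants).map String.toList).foldl (fun a s => a + s.length + 1) 0

def generate_syllables_py (pattern : String) (vowels : List String) (consonants : List String) : List String :=
  (pvGenA (vowels.map String.toList) (consonants.map String.toList)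
      ((pattern.toList.length + 1) * (pvTokSum vowels consonants + 1) * (pvTokSum vowels consonants + 1))
      pattern.toList).map String.ofList

-- ===== PORT B =====
-- tups = [[]]; for _ in range(n): tups = [t + [x] for t in tups for x in pool]
def pvTuples (pool : List (List Char)) (n : Nat) : List (List (List Char)) :=
  (List.range n).foldl (fun tups _ => tups.flatMap (fun t => pool.map (fun x => t ++ [x]))) [[]]

-- one step of the fill loop body: if ch == 'V': out.append(vt[vi]); vi += 1; elif …
-- (vt[vi]/ct[ci] are always in range because vt/ct carry exactly pattern.count('V') /
-- pattern.count('C') entries, so the pyGetD default [] is never used)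
def pvFillStep (vt ct : List (List Char)) (st : List (List Char) × Int × Int) (ch : Char) :
    List (List Char) × Int × Int :=
  if ch = 'V' then (st.1 ++ [PySem.List.pyGetD vt st.2.1 []], st.2.1 + 1, st.2.2)
  else if ch = 'C' then (st.1 ++ [PySem.List.pyGetD ct st.2.2 []], st.2.1, st.2.2 + 1)
  else (st.1 ++ [[ch]], st.2.1, st.2.2)

-- out = []; vi = ci = 0; for ch in pattern: …
def pvFillLoop (vt ct : List (List Char)) (pat : List Char) : List (List Char) × Int × Int :=
  pat.foldl (pvFillStep vt ct) ([], 0, 0)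

def generate_syllables_py_alt (pattern : String) (vowels : List String) (consonants : List String) : List String :=
  let pat := pattern.toList
  let nV := PySem.Str.count pattern "V"
  let nC := PySem.Str.count pattern "C"
  let vtups := pvTuples (vowels.map String.toList) nV
  let ctups := pvTuples (consonants.map String.toList) nC
  vtups.foldl (fun acc vt =>
    ctups.foldl (fun acc ct =>
      acc ++ [String.ofList (PySem.Chars.join [] (pvFillLoop vt ct pat).1)]) acc) []

-- ===== PRECONDITION & SPEC =====
-- Pre_ excludes inputs where a token that actually gets substituted (a vowel when the pattern
-- contains 'V', a consonant when it contains 'C') itself contains the placeholder letters 'V' or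
-- 'C': A re-scans the rebuilt string after every substitution, so such tokens are recursively
-- re-expanded (or A diverges, e.g. a vowel containing 'V'), a corner no caller of a syllable
-- generator would rely on; B treats the tokens as opaque and keeps them verbatim.
def Pre_generate_syllables_py (pattern : String) (vowels : List String) (consonants : List String) : Prop :=
  ('V' ∈ pattern.toList → ∀ s ∈ vowels, 'V' ∉ s.toList ∧ 'C' ∉ s.toList) ∧
  ('C' ∈ pattern.toList → ∀ s ∈ consonants, 'V' ∉ s.toList ∧ 'C' ∉ s.toList)
instance (pattern : String) (vowels : List String) (consonants : List String) : Decidable (Pre_generate_syllables_py pattern vowels consonants) := by unfold Pre_generate_syllables_py; infer_instance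

def pvWitness_generate_syllables_py : String × List String × List String := ("CVC", ["a", "e"], ["p", "t"])

def Spec_generate_syllables_py (pattern : String) (vowels : List String) (consonants : List String) (out : List String) : Prop := out = generate_syllables_py_alt pattern vowels consonants
instance (pattern : String) (vowels : List String) (consonants : List String) (out : List String) : Decidable (Spec_generate_syllables_py pattern vowels consonants out) := by unfold Spec_generate_syllables_py; infer_instance

-- ===== CLAIM (what is proved, stated in full; the proofs are below) =====
def Claim_equal_generate_syllables_py : Prop := ∀ (pattern : String) (vowels : List String) (consonants : List String), Dom_generate_syllables_py pattern vowels consonants → Pre_generate_syllables_py pattern vowels consonants → Spec_generate_syllables_py pattern vowels consonants (generate_syllables_py pattern vowels consonants)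

-- ===== LEMMAS AND PROOFS =====

-- the common intermediate forms: head-extension products and a structural fill
def pvProd (pool : List (List Char)) : Nat → List (List (List Char))
  | 0 => [[]]
  | n + 1 => pool.flatMap (fun x => (pvProd pool n).map (fun t => x :: t))

def pvFill : List Char → List (List Char) → List (List Char) → List Char
  | [], _, _ => []
  | ch :: rest, vt, ct =>
    if ch = 'V' then vt.headD [] ++ pvFill rest vt.tail ct
    else if ch = 'C' then ct.headD [] ++ pvFill rest vt ct.tail
    else ch :: pvFill rest vt ct

theorem pvFlatMap_single {α β : Type} (l : List α) (f : α → β) :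
    l.flatMap (fun x => [f x]) = l.map f := by
  induction l with
  | nil => rfl
  | cons x l ih => simp [ih]

theorem pvProd_length_mem (pool : List (List Char)) (n : Nat) (t : List (List Char))
    (h : t ∈ pvProd pool n) : t.length = n := by
  induction n generalizing t with
  | zero => simp [pvProd] at h; simp [h]
  | succ n ih =>
    simp [pvProd] at h
    obtain ⟨x, -, t', ht', rfl⟩ := h
    simp [ih t' ht']

theorem pvTuples_eq_pvProd (pool : List (List Char)) (n : Nat) :
    pvTuples pool n = pvProd pool n := by
  have step_map : ∀ (x : List Char) (l : List (List (List Char))),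
      (l.map (fun t => x :: t)).flatMap (fun t => pool.map (fun y => t ++ [y]))
        = (l.flatMap (fun t => pool.map (fun y => t ++ [y]))).map (fun t => x :: t) := by
    intro x l
    simp [List.flatMap_map, List.map_flatMap]
    rfl
  have key : ∀ m : Nat,
      (pvProd pool m).flatMap (fun t => pool.map (fun y => t ++ [y])) = pvProd pool (m + 1) := by
    intro m
    induction m with
    | zero =>
      show ([[]] : List (List (List Char))).flatMap _ = _
      rw [List.flatMap_singleton]
      show pool.map (fun y => [y]) = pool.flatMap (fun x => ([[]] : List (List (List Char))).map (fun t => x :: t))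
      simp [pvFlatMap_single]
    | succ m ih =>
      calc (pvProd pool (m + 1)).flatMap (fun t => pool.map (fun y => t ++ [y]))
          = pool.flatMap (fun x => ((pvProd pool m).map (fun t => x :: t)).flatMap
              (fun t => pool.map (fun y => t ++ [y]))) := by
            show (pool.flatMap _).flatMap _ = _
            rw [List.flatMap_assoc]
        _ = pool.flatMap (fun x => ((pvProd pool m).flatMap
              (fun t => pool.map (fun y => t ++ [y]))).map (fun t => x :: t)) := by
            simp only [step_map]
        _ = pvProd pool (m + 2) := by simp only [ih]; rfl
  induction n with
  | zero => simp [pvTuples, pvProd]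
  | succ n ih =>
    unfold pvTuples at ih ⊢
    rw [List.range_succ, List.foldl_append]
    simp only [List.foldl_cons, List.foldl_nil]
    rw [ih, key]

theorem pvFillStep_V (vt ct : List (List Char)) (st : List (List Char) × Int × Int) :
    pvFillStep vt ct st 'V' = (st.1 ++ [PySem.List.pyGetD vt st.2.1 []], st.2.1 + 1, st.2.2) := by
  simp [pvFillStep]

theorem pvFillStep_C (vt ct : List (List Char)) (st : List (List Char) × Int × Int) :
    pvFillStep vt ct st 'C' = (st.1 ++ [PySem.List.pyGetD ct st.2.2 []], st.2.1, st.2.2 + 1) := by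
  simp [pvFillStep]

theorem pvFillStep_lit (vt ct : List (List Char)) (st : List (List Char) × Int × Int)
    (ch : Char) (hV : ch ≠ 'V') (hC : ch ≠ 'C') :
    pvFillStep vt ct st ch = (st.1 ++ [[ch]], st.2.1, st.2.2) := by
  simp [pvFillStep, hV, hC]

theorem pvFillLoop_spec (pat : List Char) (vt ct : List (List Char)) :
    ∀ (acc : List (List Char)) (vi ci : Nat),
    pat.count 'V' + vi ≤ vt.length → pat.count 'C' + ci ≤ ct.length →
    ((pat.foldl (pvFillStep vt ct) (acc, (vi : Int), (ci : Int))).1).flatten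
      = acc.flatten ++ pvFill pat (vt.drop vi) (ct.drop ci) := by
  induction pat with
  | nil => intro acc vi ci _ _; simp [pvFill]
  | cons ch rest ih =>
    intro acc vi ci hv hc
    by_cases hV : ch = 'V'
    · subst hV
      rw [List.count_cons_self] at hv
      have hvi : vi < vt.length := by omega
      have hget : PySem.List.pyGetD vt (vi : Int) [] = vt[vi] := by
        simp [PySem.List.pyGetD_natCast, List.getD_eq_getElem?_getD, List.getElem?_eq_getElem hvi]
      have hcons : vt.drop vi = vt[vi] :: vt.drop (vi + 1) := List.drop_eq_getElem_cons hvi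
      have hc' : rest.count 'C' + ci ≤ ct.length := by
        have hle : rest.count 'C' ≤ (('V' : Char) :: rest).count 'C' := by
          rw [List.count_cons]; omega
        omega
      rw [List.foldl_cons, pvFillStep_V]
      rw [show ((vi : Int) + 1) = ((vi + 1 : Nat) : Int) by push_cast; ring]
      rw [ih (acc ++ [PySem.List.pyGetD vt (vi : Int) []]) (vi + 1) ci (by omega) hc']
      rw [hget, hcons]
      simp [pvFill, List.getElem?_eq_getElem hvi]
    · by_cases hC : ch = 'C'
      · subst hC
        rw [List.count_cons_self] at hc
        have hci : ci < ct.length := by omega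
        have hget : PySem.List.pyGetD ct (ci : Int) [] = ct[ci] := by
          simp [PySem.List.pyGetD_natCast, List.getD_eq_getElem?_getD, List.getElem?_eq_getElem hci]
        have hcons : ct.drop ci = ct[ci] :: ct.drop (ci + 1) := List.drop_eq_getElem_cons hci
        have hv' : rest.count 'V' + vi ≤ vt.length := by
          have hle : rest.count 'V' ≤ (('C' : Char) :: rest).count 'V' := by
            rw [List.count_cons]; omega
          omega
        rw [List.foldl_cons, pvFillStep_C]
        rw [show ((ci : Int) + 1) = ((ci + 1 : Nat) : Int) by push_cast; ring]
        rw [ih (acc ++ [PySem.List.pyGetD ct (ci : Int) []]) vi (ci + 1) hv' (by omega)]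
        rw [hget, hcons]
        simp [pvFill, List.getElem?_eq_getElem hci]
      · have hv' : rest.count 'V' + vi ≤ vt.length := by
          have hle : rest.count 'V' ≤ (ch :: rest).count 'V' := by
            rw [List.count_cons]; omega
          omega
        have hc' : rest.count 'C' + ci ≤ ct.length := by
          have hle : rest.count 'C' ≤ (ch :: rest).count 'C' := by
            rw [List.count_cons]; omega
          omega
        rw [List.foldl_cons, pvFillStep_lit vt ct _ ch hV hC]
        rw [ih (acc ++ [[ch]]) vi ci hv' hc']
        simp [pvFill, hV, hC]

theorem pvFill_id (pat : List Char) (vt ct : List (List Char))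
    (hV : 'V' ∉ pat) (hC : 'C' ∉ pat) : pvFill pat vt ct = pat := by
  induction pat with
  | nil => rfl
  | cons ch rest ih =>
    simp only [List.mem_cons, not_or] at hV hC
    have h1 : ch ≠ 'V' := fun h => hV.1 h.symm
    have h2 : ch ≠ 'C' := fun h => hC.1 h.symm
    simp [pvFill, h1, h2, ih hV.2 hC.2]

theorem pvFill_lit (v post : List Char) (vt ct : List (List Char))
    (hV : 'V' ∉ v) (hC : 'C' ∉ v) : pvFill (v ++ post) vt ct = v ++ pvFill post vt ct := by
  induction v with
  | nil => rfl
  | cons ch rest ih =>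
    simp only [List.mem_cons, not_or] at hV hC
    have h1 : ch ≠ 'V' := fun h => hV.1 h.symm
    have h2 : ch ≠ 'C' := fun h => hC.1 h.symm
    simp [pvFill, h1, h2, ih hV.2 hC.2]

theorem pvFill_subst_V (pre post v : List Char) (vt : List (List Char))
    (hpre : 'V' ∉ pre) (hvV : 'V' ∉ v) (hvC : 'C' ∉ v) :
    ∀ ct, pvFill (pre ++ 'V' :: post) (v :: vt) ct = pvFill (pre ++ v ++ post) vt ct := by
  induction pre with
  | nil =>
    intro ct
    simp only [List.nil_append]
    rw [pvFill_lit v post vt ct hvV hvC]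
    simp [pvFill]
  | cons ch rest ih =>
    intro ct
    simp only [List.mem_cons, not_or] at hpre
    have h1 : ch ≠ 'V' := fun h => hpre.1 h.symm
    by_cases hC : ch = 'C'
    · subst hC
      simp only [List.cons_append, List.append_assoc]
      simp [pvFill]
      have := ih hpre.2 ct.tail
      rw [List.append_assoc] at this
      exact this
    · simp only [List.cons_append, List.append_assoc]
      simp [pvFill, h1, hC]
      have := ih hpre.2 ct
      rw [List.append_assoc] at this
      exact this

theorem pvFill_subst_C (pre post c : List Char) (vt ct : List (List Char))
    (hpreV : 'V' ∉ pre) (hpreC : 'C' ∉ pre) (hcV : 'V' ∉ c) (hcC : 'C' ∉ c) :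
    pvFill (pre ++ 'C' :: post) vt (c :: ct) = pvFill (pre ++ c ++ post) vt ct := by
  induction pre with
  | nil =>
    simp only [List.nil_append]
    rw [pvFill_lit c post vt ct hcV hcC]
    simp [pvFill]
  | cons ch rest ih =>
    simp only [List.mem_cons, not_or] at hpreV hpreC
    have h1 : ch ≠ 'V' := fun h => hpreV.1 h.symm
    have h2 : ch ≠ 'C' := fun h => hpreC.1 h.symm
    simp only [List.cons_append, List.append_assoc]
    simp [pvFill, h1, h2]
    have := ih hpreV.2 hpreC.2
    rw [List.append_assoc] at this
    exact this

-- decomposition at the first occurrence of a single character, from PySem's find_spec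
theorem pvFind_single_char (c : Char) (pat : List Char)
    (h : 0 ≤ PySem.Chars.find pat [c]) :
    c ∉ pat.take (PySem.Chars.find pat [c]).toNat ∧
    pat = pat.take (PySem.Chars.find pat [c]).toNat ++
      c :: pat.drop ((PySem.Chars.find pat [c]).toNat + 1) := by
  obtain ⟨hpre, hmin⟩ := PySem.Chars.find_spec (s := pat) (sub := [c]) h
  set i := (PySem.Chars.find pat [c]).toNat with hi
  obtain ⟨t, ht⟩ := hpre
  have hrest : pat.drop i = c :: t := by rw [← ht]; rfl
  have ht2 : pat.drop (i + 1) = t := by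
    rw [← List.tail_drop, hrest]
    rfl
  constructor
  · intro hmem
    obtain ⟨j, hj, hjc⟩ := List.mem_iff_getElem.mp hmem
    have hjlen : (pat.take i).length = min i pat.length := List.length_take
    have hj1 : j < i := by omega
    have hj2 : j < pat.length := by omega
    apply hmin j hj1
    have hd : pat.drop j = pat[j] :: pat.drop (j + 1) := List.drop_eq_getElem_cons hj2
    have hjc' : pat[j] = c := by
      rw [← hjc]
      exact (List.getElem_take (h := hj)).symm ▸ rfl
    exact ⟨pat.drop (j + 1), by rw [hd, hjc']; rfl⟩
  · conv_lhs => rw [← List.take_append_drop i pat]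
    rw [hrest, ht2]

theorem pvCount_le_length (pat : List Char) :
    pat.count 'V' + pat.count 'C' ≤ pat.length := by
  induction pat with
  | nil => simp
  | cons ch rest ih =>
    rw [List.count_cons, List.count_cons]
    by_cases h : ch = 'V'
    · subst h; simp; omega
    · by_cases h2 : ch = 'C'
      · subst h2; simp; omega
      · simp [h, h2]; omega

theorem pvNotMem_of_find_neg (c : Char) (pat : List Char)
    (h : ¬ PySem.Chars.find pat [c] > -1) : c ∉ pat := by
  have hle := PySem.Chars.neg_one_le_find pat [c]
  have heq : PySem.Chars.find pat [c] = -1 := by omega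
  have hnin := (PySem.Chars.find_eq_neg_one_iff pat [c]).mp heq
  intro hmem
  obtain ⟨s, t, hst⟩ := List.append_of_mem hmem
  exact hnin ⟨s, t, by rw [hst]; simp⟩

-- the heart: A's fuel recursion equals product-then-fill, given enough fuel and clean tokens
theorem pvGenA_spec (vs cs : List (List Char)) (fuel : Nat) : ∀ (pat : List Char),
    ('V' ∈ pat → ∀ v ∈ vs, 'V' ∉ v ∧ 'C' ∉ v) →
    ('C' ∈ pat → ∀ c ∈ cs, 'V' ∉ c ∧ 'C' ∉ c) →
    pat.count 'V' + pat.count 'C' < fuel →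
    pvGenA vs cs fuel pat =
      (pvProd vs (pat.count 'V')).flatMap (fun vt =>
        (pvProd cs (pat.count 'C')).map (fun ct => pvFill pat vt ct)) := by
  induction fuel with
  | zero => intro pat _ _ h; omega
  | succ fuel ih =>
    intro pat hvsc hcsc hfuel
    by_cases hV : PySem.Chars.find pat ['V'] > -1
    · -- V branch
      have h0 : 0 ≤ PySem.Chars.find pat ['V'] := by omega
      obtain ⟨hnotmem, hdecomp⟩ := pvFind_single_char 'V' pat h0
      set i := (PySem.Chars.find pat ['V']).toNat with hidef
      set pre := pat.take i with hpredef
      set post := pat.drop (i + 1) with hpostdef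
      have hsl1 : PySem.List.slice pat none (some (PySem.Chars.find pat ['V'])) = pre := by
        rw [PySem.List.slice_to pat h0]
      have hsl2 : PySem.List.slice pat (some (PySem.Chars.find pat ['V'] + 1)) none = post := by
        rw [PySem.List.slice_from pat (by omega : (0:Int) ≤ PySem.Chars.find pat ['V'] + 1)]
        rw [hpostdef]
        congr 1
        omega
      have hcountV : pat.count 'V' = post.count 'V' + 1 := by
        conv_lhs => rw [hdecomp]
        rw [List.count_append, List.count_cons_self, List.count_eq_zero_of_not_mem hnotmem]
        omega
      have hcountC : pat.count 'C' = pre.count 'C' + post.count 'C' := by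
        conv_lhs => rw [hdecomp]
        rw [List.count_append, List.count_cons_of_ne (by decide)]
      unfold pvGenA
      simp only [if_pos hV]
      rw [PySem.List.foldl_append_eq_flatMap, List.nil_append, hsl1, hsl2, hcountV, hcountC]
      conv_rhs => rw [hdecomp]
      rw [show pvProd vs (post.count 'V' + 1)
          = vs.flatMap (fun x => (pvProd vs (post.count 'V')).map (fun t => x :: t)) from rfl]
      rw [List.flatMap_assoc]
      apply List.flatMap_congr
      intro v hvmem
      have hVpat : 'V' ∈ pat := by rw [hdecomp]; simp
      obtain ⟨hvV, hvC⟩ := hvsc hVpat v hvmem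
      have hpat'V : (pre ++ v ++ post).count 'V' = post.count 'V' := by
        rw [List.count_append, List.count_append,
          List.count_eq_zero_of_not_mem hnotmem, List.count_eq_zero_of_not_mem hvV]
        omega
      have hpat'C : (pre ++ v ++ post).count 'C' = pre.count 'C' + post.count 'C' := by
        rw [List.count_append, List.count_append, List.count_eq_zero_of_not_mem hvC]
        omega
      have hvsc' : 'V' ∈ pre ++ v ++ post → ∀ w ∈ vs, 'V' ∉ w ∧ 'C' ∉ w := fun _ => hvsc hVpat
      have hcsc' : 'C' ∈ pre ++ v ++ post → ∀ c ∈ cs, 'V' ∉ c ∧ 'C' ∉ c := by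
        intro hm
        apply hcsc
        rw [hdecomp]
        simp only [List.mem_append, List.mem_cons] at hm ⊢
        rcases hm with (hm | hm) | hm
        · exact Or.inl hm
        · exact absurd hm hvC
        · exact Or.inr (Or.inr hm)
      rw [ih (pre ++ v ++ post) hvsc' hcsc' (by rw [hpat'V, hpat'C]; omega)]
      rw [hpat'V, hpat'C, List.flatMap_map]
      apply List.flatMap_congr
      intro vt hvt
      apply List.map_congr_left
      intro ct hct
      exact (pvFill_subst_V pre post v vt hnotmem hvV hvC ct).symm
    · -- no V
      have hVnot : 'V' ∉ pat := pvNotMem_of_find_neg 'V' pat hV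
      have hcV0 : pat.count 'V' = 0 := List.count_eq_zero_of_not_mem hVnot
      by_cases hC : PySem.Chars.find pat ['C'] > -1
      · have h0 : 0 ≤ PySem.Chars.find pat ['C'] := by omega
        obtain ⟨hnotmem, hdecomp⟩ := pvFind_single_char 'C' pat h0
        set j := (PySem.Chars.find pat ['C']).toNat with hjdef
        set pre := pat.take j with hpredef
        set post := pat.drop (j + 1) with hpostdef
        have hsl1 : PySem.List.slice pat none (some (PySem.Chars.find pat ['C'])) = pre := by
          rw [PySem.List.slice_to pat h0]
        have hsl2 : PySem.List.slice pat (some (PySem.Chars.find pat ['C'] + 1)) none = post := by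
          rw [PySem.List.slice_from pat (by omega : (0:Int) ≤ PySem.Chars.find pat ['C'] + 1)]
          rw [hpostdef]
          congr 1
          omega
        have hpreV : 'V' ∉ pre := fun hm => hVnot (List.mem_of_mem_take hm)
        have hpostV : 'V' ∉ post := fun hm => hVnot (List.mem_of_mem_drop hm)
        have hcountC : pat.count 'C' = post.count 'C' + 1 := by
          conv_lhs => rw [hdecomp]
          rw [List.count_append, List.count_cons_self, List.count_eq_zero_of_not_mem hnotmem]
          omega
        unfold pvGenA
        simp only [if_neg hV, if_pos hC]
        rw [PySem.List.foldl_append_eq_flatMap, List.nil_append, hsl1, hsl2, hcV0, hcountC]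
        conv_rhs => rw [hdecomp]
        rw [show pvProd vs 0 = [([] : List (List Char))] from rfl, List.flatMap_singleton]
        rw [show pvProd cs (post.count 'C' + 1)
            = cs.flatMap (fun x => (pvProd cs (post.count 'C')).map (fun t => x :: t)) from rfl]
        rw [List.map_flatMap]
        apply List.flatMap_congr
        intro c hcmem
        have hCpat : 'C' ∈ pat := by rw [hdecomp]; simp
        obtain ⟨hcV, hcC⟩ := hcsc hCpat c hcmem
        have hpat'V : (pre ++ c ++ post).count 'V' = 0 := by
          rw [List.count_append, List.count_append, List.count_eq_zero_of_not_mem hpreV,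
            List.count_eq_zero_of_not_mem hcV, List.count_eq_zero_of_not_mem hpostV]
        have hpat'C : (pre ++ c ++ post).count 'C' = post.count 'C' := by
          rw [List.count_append, List.count_append,
            List.count_eq_zero_of_not_mem hnotmem, List.count_eq_zero_of_not_mem hcC]
          omega
        have hvsc' : 'V' ∈ pre ++ c ++ post → ∀ w ∈ vs, 'V' ∉ w ∧ 'C' ∉ w := by
          intro hm
          exfalso
          simp only [List.mem_append] at hm
          rcases hm with (hm | hm) | hm
          · exact hpreV hm
          · exact hcV hm
          · exact hpostV hm
        have hcsc' : 'C' ∈ pre ++ c ++ post → ∀ d ∈ cs, 'V' ∉ d ∧ 'C' ∉ d := fun _ => hcsc hCpat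
        rw [ih (pre ++ c ++ post) hvsc' hcsc' (by rw [hpat'V, hpat'C]; omega)]
        rw [hpat'V, hpat'C]
        rw [show pvProd vs 0 = [([] : List (List Char))] from rfl, List.flatMap_singleton]
        rw [List.map_map]
        apply List.map_congr_left
        intro ct hct
        show pvFill (pre ++ c ++ post) [] ct = pvFill (pre ++ 'C' :: post) [] (c :: ct)
        exact (pvFill_subst_C pre post c [] ct hpreV hnotmem hcV hcC).symm
      · have hCnot : 'C' ∉ pat := pvNotMem_of_find_neg 'C' pat hC
        have hcC0 : pat.count 'C' = 0 := List.count_eq_zero_of_not_mem hCnot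
        unfold pvGenA
        simp only [if_neg hV, if_neg hC]
        rw [hcV0, hcC0]
        rw [show pvProd vs 0 = [([] : List (List Char))] from rfl, List.flatMap_singleton]
        rw [show pvProd cs 0 = [([] : List (List Char))] from rfl]
        simp [pvFill_id pat [] [] hVnot hCnot]

-- join with empty separator is flatten
theorem pvJoin_nil_eq_flatten (l : List (List Char)) :
    PySem.Chars.join [] l = l.flatten := by
  induction l with
  | nil => simp [PySem.Chars.join_nil]
  | cons x l ih =>
    cases l with
    | nil => simp [PySem.Chars.join, List.intercalate, List.intersperse]
    | cons y l' =>
      rw [PySem.Chars.join_cons_cons]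
      simp only [List.flatten_cons]
      rw [ih]
      simp

-- Python's str.count for a single-character needle is List.count
theorem pvCountGo_single (c : Char) (l : List Char) :
    ∀ (fuel acc : Nat), l.length ≤ fuel →
    PySem.Chars.count.go [c] fuel l acc = acc + l.count c := by
  induction l with
  | nil =>
    intro fuel acc _
    cases fuel <;> simp [PySem.Chars.count.go]
  | cons h t ih =>
    intro fuel acc hf
    cases fuel with
    | zero => simp at hf
    | succ f =>
      have hf' : t.length ≤ f := by simp at hf; omega
      by_cases hch : c = h
      · subst hch
        simp [PySem.Chars.count.go, List.isPrefixOf, ih f (acc + 1) hf']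
        omega
      · simp [PySem.Chars.count.go, List.isPrefixOf, beq_false_of_ne hch,
          ih f acc hf', Ne.symm hch]

theorem pvCount_singleton (s : List Char) (c : Char) :
    PySem.Chars.count s [c] = s.count c := by
  rw [show PySem.Chars.count s [c]
      = PySem.Chars.count.go [c] s.length s 0 from rfl]
  rw [pvCountGo_single c s s.length 0 le_rfl]
  omega

-- B's port equals product-then-fill as well
theorem pvAlt_spec (pattern : String) (vowels consonants : List String) :
    generate_syllables_py_alt pattern vowels consonants =
      ((pvProd (vowels.map String.toList) (pattern.toList.count 'V')).flatMap (fun vt =>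
        (pvProd (consonants.map String.toList) (pattern.toList.count 'C')).map
          (fun ct => pvFill pattern.toList vt ct))).map String.ofList := by
  unfold generate_syllables_py_alt
  have hcV : PySem.Str.count pattern "V" = pattern.toList.count 'V' := by
    rw [PySem.Str.count_eq]
    exact pvCount_singleton pattern.toList 'V'
  have hcC : PySem.Str.count pattern "C" = pattern.toList.count 'C' := by
    rw [PySem.Str.count_eq]
    exact pvCount_singleton pattern.toList 'C'
  simp only [hcV, hcC, pvTuples_eq_pvProd]
  set vtups := pvProd (vowels.map String.toList) (pattern.toList.count 'V') with hvt
  set ctups := pvProd (consonants.map String.toList) (pattern.toList.count 'C') with hct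
  have inner : ∀ (vt : List (List Char)), vt ∈ vtups → ∀ acc,
      ctups.foldl (fun acc ct =>
        acc ++ [String.ofList (PySem.Chars.join [] (pvFillLoop vt ct pattern.toList).1)]) acc
      = acc ++ (ctups.map (fun ct => String.ofList (pvFill pattern.toList vt ct))) := by
    intro vt hvtmem acc
    rw [PySem.List.foldl_append_singleton_eq_map]
    congr 1
    apply List.map_congr_left
    intro ct hctmem
    congr 1
    rw [pvJoin_nil_eq_flatten]
    have hlenv : vt.length = pattern.toList.count 'V' := pvProd_length_mem _ _ _ hvtmem
    have hlenc : ct.length = pattern.toList.count 'C' := pvProd_length_mem _ _ _ hctmem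
    have hspec := pvFillLoop_spec pattern.toList vt ct [] 0 0 (by omega) (by omega)
    simp only [Nat.cast_zero, List.drop_zero] at hspec
    unfold pvFillLoop
    rw [hspec]
    simp
  have outer : ∀ (l : List (List (List Char))), (∀ vt ∈ l, vt ∈ vtups) → ∀ acc,
      l.foldl (fun acc vt => ctups.foldl (fun acc ct =>
        acc ++ [String.ofList (PySem.Chars.join [] (pvFillLoop vt ct pattern.toList).1)]) acc) acc
      = acc ++ (l.flatMap (fun vt => ctups.map
          (fun ct => String.ofList (pvFill pattern.toList vt ct)))) := by
    intro l
    induction l with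
    | nil => intro _ acc; simp
    | cons vt l ihl =>
      intro hmem acc
      simp only [List.foldl_cons, List.flatMap_cons]
      rw [inner vt (hmem vt (by simp)) acc]
      rw [ihl (fun x hx => hmem x (by simp [hx])) _]
      simp
  rw [outer vtups (fun _ h => h) []]
  rw [List.nil_append, List.map_flatMap]
  apply List.flatMap_congr
  intro vt hvtmem
  rw [List.map_map]
  rfl

-- ===== VERDICT (by name: the statement is the Claim_ definition above) =====
theorem generate_syllables_py_spec : Claim_equal_generate_syllables_py := by
  intro pattern vowels consonants _hdom hpre
  unfold Spec_generate_syllables_py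
  unfold generate_syllables_py
  obtain ⟨hv, hc⟩ := hpre
  have hvs : 'V' ∈ pattern.toList → ∀ v ∈ vowels.map String.toList, 'V' ∉ v ∧ 'C' ∉ v := by
    intro hm v hvm
    obtain ⟨s, hs, rfl⟩ := List.mem_map.mp hvm
    exact hv hm s hs
  have hcs : 'C' ∈ pattern.toList → ∀ c ∈ consonants.map String.toList, 'V' ∉ c ∧ 'C' ∉ c := by
    intro hm c hcm
    obtain ⟨s, hs, rfl⟩ := List.mem_map.mp hcm
    exact hc hm s hs
  have hfuel : pattern.toList.count 'V' + pattern.toList.count 'C' <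
      (pattern.toList.length + 1) * (pvTokSum vowels consonants + 1) *
        (pvTokSum vowels consonants + 1) := by
    have h1 := pvCount_le_length pattern.toList
    have hp : 0 < pvTokSum vowels consonants + 1 := Nat.succ_pos _
    have h2 : pattern.toList.length + 1 ≤
        (pattern.toList.length + 1) * (pvTokSum vowels consonants + 1) *
          (pvTokSum vowels consonants + 1) :=
      le_trans (Nat.le_mul_of_pos_right _ hp) (Nat.le_mul_of_pos_right _ hp)
    omega
  rw [pvGenA_spec (vowels.map String.toList) (consonants.map String.toList) _
    pattern.toList hvs hcs hfuel]
  rw [pvAlt_spec]
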